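-- pv_equiv track=rewrite | github.com/strangedev/NEAT_PyGenetics | NEAT/Analyst/GenomeClusterer.py | calculate_disjoint_excess_count
-- ===== SOURCE A (Python) =====
-- from typing import List, Tuple, Dict
--
-- def calculate_disjoint_excess_count(
--
--         smaller_genome_gene_ids: List[int],
--         differing_genes: List[int]
-- ) -> Tuple[int, int]:
--     """
--     Calculates the amount of excess and disjoint genes
--     for two genomes, given the gene ids of the smaller
--     genome and the set of differing genes.
--     :param smaller_genome_gene_ids: A list of gene ids of the smaller genome
--     :param differing_genes: A list of differing genes
--     :return: The amount of excess and disjoint genes as tuple.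
--     """
--
--     smaller_genome_range = 0  # type: int
--
--     for gene_id in smaller_genome_gene_ids:
--
--         if gene_id > smaller_genome_range:
--             smaller_genome_range = gene_id
--
--     excess_genes = [gene_id for gene_id in differing_genes \
--                     if gene_id > smaller_genome_range]
--
--     disjoint_genes = [gene_id for gene_id in differing_genes \
--                       if gene_id not in excess_genes]
--
--     return (len(disjoint_genes), len(excess_genes))
-- ===== SOURCE B (Python) =====
-- def calculate_disjoint_excess_count(smaller_genome_gene_ids, differing_genes):
--     threshold = max([0, *smaller_genome_gene_ids])
--     ordered = sorted(differing_genes)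
--     lo, hi = 0, len(ordered)
--     while lo < hi:
--         mid = (lo + hi) // 2
--         if ordered[mid] > threshold:
--             hi = mid
--         else:
--             lo = mid + 1
--     return (lo, len(ordered) - lo)
-- ===== Notes on version B (the rewrite author's own statement) =====
-- stated objective: alternative
-- what changed: Replaces A's per-gene membership rescan of the excess list with sort-then-binary-search: sort the differing genes and locate the first one above the smaller genome's max id, so disjoint/excess are the index and the remainder.
import Mathlib
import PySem

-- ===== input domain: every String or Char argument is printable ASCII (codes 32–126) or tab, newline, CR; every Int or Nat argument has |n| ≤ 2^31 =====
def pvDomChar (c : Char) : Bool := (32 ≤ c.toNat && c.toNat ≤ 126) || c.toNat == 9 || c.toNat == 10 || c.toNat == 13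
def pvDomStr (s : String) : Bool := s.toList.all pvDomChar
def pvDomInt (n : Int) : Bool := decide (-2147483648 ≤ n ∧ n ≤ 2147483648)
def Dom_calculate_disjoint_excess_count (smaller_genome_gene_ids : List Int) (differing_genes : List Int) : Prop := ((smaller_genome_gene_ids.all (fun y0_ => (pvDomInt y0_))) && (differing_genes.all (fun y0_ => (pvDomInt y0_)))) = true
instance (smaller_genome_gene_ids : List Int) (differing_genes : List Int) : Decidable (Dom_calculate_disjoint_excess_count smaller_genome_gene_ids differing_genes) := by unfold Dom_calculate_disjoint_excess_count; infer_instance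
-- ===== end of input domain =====

-- B replaces A's per-gene membership rescan of the excess list with sort-then-binary-search over the differing genes (a different algorithm of similar measured cost; a timing run did not confirm a speed-up).


-- ===== PORT A =====
def calculate_disjoint_excess_count (smaller_genome_gene_ids : List Int) (differing_genes : List Int) : Int × Int :=
  -- for-loop computing smaller_genome_range
  let smaller_genome_range : Int :=
    smaller_genome_gene_ids.foldl (fun r g => if g > r then g else r) 0
  -- [g for g in differing_genes if g > smaller_genome_range]
  let excess_genes := differing_genes.filter (fun g => decide (g > smaller_genome_range))
  -- [g for g in differing_genes if g not in excess_genes]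
  let disjoint_genes := differing_genes.filter (fun g => !(excess_genes.contains g))
  ((disjoint_genes.length : Int), (excess_genes.length : Int))

-- ===== PORT B =====
-- the 'while lo < hi' binary-search loop of Source B; ordered[mid] is always in range
-- (lo ≤ mid < hi ≤ len), so getD is exact there
def pyBisect (ordered : List Int) (threshold : Int) (lo hi : Nat) : Nat :=
  if lo < hi then
    let mid := (lo + hi) / 2
    if ordered.getD mid 0 > threshold then pyBisect ordered threshold lo mid
    else pyBisect ordered threshold (mid + 1) hi
  else lo
termination_by hi - lo
decreasing_by all_goals omega

def calculate_disjoint_excess_count_alt (smaller_genome_gene_ids : List Int) (differing_genes : List Int) : Int × Int :=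
  -- max([0, *smaller_genome_gene_ids])
  let threshold : Int := smaller_genome_gene_ids.foldl max 0
  -- sorted(differing_genes)
  let ordered := PySem.List.sorted differing_genes (fun x => x) false
  -- binary search for the first index whose gene exceeds the threshold
  let lo := pyBisect ordered threshold 0 ordered.length
  ((lo : Int), (ordered.length : Int) - (lo : Int))

-- ===== PRECONDITION & SPEC =====
def Spec_calculate_disjoint_excess_count (smaller_genome_gene_ids : List Int) (differing_genes : List Int) (out : Int × Int) : Prop := out = calculate_disjoint_excess_count_alt smaller_genome_gene_ids differing_genes
instance (smaller_genome_gene_ids : List Int) (differing_genes : List Int) (out : Int × Int) : Decidable (Spec_calculate_disjoint_excess_count smaller_genome_gene_ids differing_genes out) := by unfold Spec_calculate_disjoint_excess_count; infer_instance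

-- ===== CLAIM (what is proved, stated in full; the proofs are below) =====
def Claim_equal_calculate_disjoint_excess_count : Prop := ∀ (smaller_genome_gene_ids : List Int) (differing_genes : List Int), Dom_calculate_disjoint_excess_count smaller_genome_gene_ids differing_genes → Spec_calculate_disjoint_excess_count smaller_genome_gene_ids differing_genes (calculate_disjoint_excess_count smaller_genome_gene_ids differing_genes)

-- ===== LEMMAS AND PROOFS =====

-- the two max-accumulating folds agree
theorem fold_max_eq (xs : List Int) :
    xs.foldl (fun r g => if g > r then g else r) 0 = xs.foldl max 0 := by
  have h : ∀ (a : Int), xs.foldl (fun r g => if g > r then g else r) a = xs.foldl max a := by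
    induction xs with
    | nil => intro a; rfl
    | cons x xs ih =>
      intro a
      simp only [List.foldl_cons, ih]
      congr 1
      by_cases hx : x > a
      · simp [hx, max_eq_right (le_of_lt hx)]
      · simp [hx, max_eq_left (le_of_not_gt hx)]
  exact h 0

-- A's second comprehension filters out exactly the genes above the threshold
theorem disjoint_filter_eq (t : Int) (gs : List Int) :
    gs.filter (fun g => !((gs.filter (fun g' => decide (g' > t))).contains g))
      = gs.filter (fun g => decide (g ≤ t)) := by
  apply List.filter_congr
  intro x hx
  by_cases h : x ≤ t
  · simp [hx, h]
  · simp [hx, h]; omega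

-- in a ≤-sorted list the genes ≤ t form exactly the initial segment of length countP (≤ t)
theorem sorted_getD_le_iff (xs : List Int) (h : xs.Pairwise (· ≤ ·)) (t : Int) :
    ∀ i, i < xs.length → (xs.getD i 0 ≤ t ↔ i < xs.countP (fun g => decide (g ≤ t))) := by
  induction xs with
  | nil => intro i hi; simp at hi
  | cons x xs ih =>
    rcases List.pairwise_cons.mp h with ⟨hx, h'⟩
    intro i hi
    cases i with
    | zero =>
      simp only [List.getD_cons_zero, List.countP_cons]
      by_cases hxt : x ≤ t
      · simp [hxt]
      · have hz : xs.countP (fun g => decide (g ≤ t)) = 0 := by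
          rw [List.countP_eq_zero]
          intro a ha
          have := hx a ha
          simp; omega
        simp [hxt, hz]
    | succ i =>
      simp only [List.getD_cons_succ, List.countP_cons]
      have hi' : i < xs.length := by simpa using hi
      by_cases hxt : x ≤ t
      · rw [ih h' i hi']
        simp [hxt]
      · have hz : xs.countP (fun g => decide (g ≤ t)) = 0 := by
          rw [List.countP_eq_zero]
          intro a ha
          have := hx a ha
          simp; omega
        have hmem : xs.getD i 0 ∈ xs := by
          rw [List.getD_eq_getElem _ _ hi']
          exact List.getElem_mem hi'
        have hgt : ¬ xs.getD i 0 ≤ t := by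
          have := hx _ hmem
          omega
        simp only [List.getD] at hgt ⊢
        simp [hxt, hz]
        omega

-- the binary search returns the count of genes ≤ t, given the initial-segment characterisation
theorem pyBisect_eq_countP (xs : List Int) (t : Int) (c : Nat)
    (hchar : ∀ i, i < xs.length → (xs.getD i 0 ≤ t ↔ i < c)) :
    ∀ lo hi, lo ≤ c → c ≤ hi → hi ≤ xs.length → pyBisect xs t lo hi = c := by
  suffices H : ∀ n lo hi, hi - lo ≤ n → lo ≤ c → c ≤ hi → hi ≤ xs.length →
      pyBisect xs t lo hi = c by
    intro lo hi h1 h2 h3; exact H (hi - lo) lo hi le_rfl h1 h2 h3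
  intro n
  induction n with
  | zero =>
    intro lo hi hf h1 h2 h3
    rw [pyBisect]
    have : ¬ lo < hi := by omega
    simp [this]; omega
  | succ n ih =>
    intro lo hi hf h1 h2 h3
    rw [pyBisect]
    by_cases hlt : lo < hi
    · simp only [hlt, if_true]
      have hmid1 : lo ≤ (lo + hi) / 2 := by omega
      have hmid2 : (lo + hi) / 2 < hi := by omega
      have hmlen : (lo + hi) / 2 < xs.length := by omega
      by_cases hgt : xs.getD ((lo + hi) / 2) 0 > t
      · have hc : ¬ ((lo + hi) / 2 < c) := by
          intro hc
          have := (hchar _ hmlen).mpr hc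
          omega
        simp only [hgt, if_true]
        exact ih lo ((lo + hi) / 2) (by omega) h1 (by omega) (by omega)
      · have hle : xs.getD ((lo + hi) / 2) 0 ≤ t := by omega
        have hc : (lo + hi) / 2 < c := (hchar _ hmlen).mp hle
        simp only [hgt, if_false]
        exact ih ((lo + hi) / 2 + 1) hi (by omega) (by omega) h2 h3
    · simp [hlt]; omega

theorem calculate_disjoint_excess_count_spec : Claim_equal_calculate_disjoint_excess_count := by
  intro ids gs _
  unfold Spec_calculate_disjoint_excess_count
  unfold calculate_disjoint_excess_count calculate_disjoint_excess_count_alt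
  simp only [fold_max_eq, disjoint_filter_eq]
  set t := ids.foldl max 0 with ht
  set ordered := PySem.List.sorted gs (fun x => x) false with hord
  have hperm : ordered.Perm gs := PySem.List.sorted_perm gs (fun x => x) false
  have hpw : ordered.Pairwise (· ≤ ·) := by
    have := PySem.List.sorted_pairwise (xs := gs) (key := fun x : Int => x)
    simpa [hord] using this
  set c := ordered.countP (fun g => decide (g ≤ t)) with hc
  have hchar := sorted_getD_le_iff ordered hpw t
  have hb : pyBisect ordered t 0 ordered.length = c :=
    pyBisect_eq_countP ordered t c (by simpa [hc] using hchar) 0 ordered.length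
      (Nat.zero_le _) (by simpa [hc] using List.countP_le_length (l := ordered)) le_rfl
  have hcg : c = gs.countP (fun g => decide (g ≤ t)) := hperm.countP_eq _
  have hlen : ordered.length = gs.length := hperm.length_eq
  have hsplit : gs.countP (fun g => decide (g ≤ t))
      + gs.countP (fun g => decide (g > t)) = gs.length := by
    rw [List.length_eq_countP_add_countP (l := gs) (p := fun g => decide (g ≤ t))]
    congr 1
    apply List.countP_congr; intro x _; simp
  simp only [hb, Prod.mk.injEq, ← List.countP_eq_length_filter]
  omega
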